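-- pv_equiv track=rewrite | github.com/emayecs/nerdle-solver | generate.py | valid_equation
-- ===== SOURCE A (Python) =====
-- def is_operation(c):
--     operations = ['+','-','*','/','=']
--     return c in operations
--
-- def valid_equation(eq):
--     if (is_operation(eq[0]) or is_operation(eq[-1])):
--         return False
--     if (eq.count('=')!=1):
--         return False
--     for i in range(0,len(eq)):
--         # if an operation is next to another operation
--         if (not is_operation(eq[i])):
--             continue
--         if (i+1<len(eq) and is_operation(eq[i+1])):
--             return False
--     if '/' in eq:
--         # divide by 0
--         for i in range(0, len(eq)-1):
--             if eq[i]=='/' and eq[i+1]=='0':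
--                 return False
--     return True
-- ===== SOURCE B (Python) =====
-- def valid_equation(eq):
--     OPS = '+-*/='
--     prev = eq[0]
--     bad = prev in OPS
--     eqs = 1 if prev == '=' else 0
--     for c in eq[1:]:
--         if prev in OPS and c in OPS:
--             bad = True
--         if prev == '/' and c == '0':
--             bad = True
--         if c == '=':
--             eqs += 1
--         prev = c
--     return not bad and prev not in OPS and eqs == 1
-- ===== Notes on version B (the rewrite author's own statement) =====
-- stated objective: alternative
-- what changed: Replaces A's four staged passes (endpoint checks, an equals-sign count, an indexed adjacency loop, a guarded division-by-zero loop) with a single left-to-right state-machine pass carrying (previous char, equals-sign count, bad flag) and one final conjunction.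
import Mathlib
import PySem

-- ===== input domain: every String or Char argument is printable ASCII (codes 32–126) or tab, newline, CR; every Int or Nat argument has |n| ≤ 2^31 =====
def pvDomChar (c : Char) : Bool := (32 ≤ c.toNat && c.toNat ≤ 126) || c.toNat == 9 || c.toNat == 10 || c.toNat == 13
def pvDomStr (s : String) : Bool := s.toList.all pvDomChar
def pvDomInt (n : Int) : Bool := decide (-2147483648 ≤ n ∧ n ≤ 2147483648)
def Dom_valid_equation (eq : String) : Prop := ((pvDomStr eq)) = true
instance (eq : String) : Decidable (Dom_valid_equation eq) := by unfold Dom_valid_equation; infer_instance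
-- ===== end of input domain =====

-- B replaces A's four staged passes by one left-to-right state-machine pass (alternative decomposition; same cost).

-- ===== PORT A =====
def is_operation (c : Char) : Bool := ['+','-','*','/','='].contains c

-- the 'for i in range(0, len(eq))' adjacency loop, early return = false
def pvScanOps (s : List Char) : List Int → Bool
  | [] => true
  | i :: rest =>
      if !(is_operation (PySem.List.pyGetD s i ' ')) then pvScanOps s rest
      else if decide (i + 1 < (s.length : Int)) && is_operation (PySem.List.pyGetD s (i+1) ' ') then false
      else pvScanOps s rest

-- the 'for i in range(0, len(eq)-1)' division-by-zero loop, early return = false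
def pvScanDiv (s : List Char) : List Int → Bool
  | [] => true
  | i :: rest =>
      if PySem.List.pyGetD s i ' ' == '/' && PySem.List.pyGetD s (i+1) ' ' == '0' then false
      else pvScanDiv s rest

def valid_equation (eq : String) : Bool :=
  let s := eq.toList
  -- eq[0] / eq[-1]: in range under Pre_ (eq nonempty)
  if is_operation (PySem.List.pyGetD s 0 ' ') || is_operation (PySem.List.pyGetD s (-1) ' ') then false
  else if PySem.Str.count eq "=" ≠ 1 then false
  else if pvScanOps s (PySem.List.pyRange 0 (s.length : Int) 1) = false then false
  else if PySem.Str.isIn "/" eq then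
    if pvScanDiv s (PySem.List.pyRange 0 ((s.length : Int) - 1) 1) = false then false else true
  else true

-- ===== PORT B =====
-- 'c in OPS' with OPS = '+-*/='
def pvIsOp (c : Char) : Bool := "+-*/=".toList.contains c

-- state = (prev, eqs, bad); the loop body of B's single pass
def pvStep (st : Char × Int × Bool) (c : Char) : Char × Int × Bool :=
  let bad := st.2.2 || (pvIsOp st.1 && pvIsOp c) || (st.1 == '/' && c == '0')
  let eqs := if c == '=' then st.2.1 + 1 else st.2.1
  (c, eqs, bad)

def valid_equation_alt (eq : String) : Bool :=
  let s := eq.toList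
  let prev0 := PySem.List.pyGetD s 0 ' '   -- eq[0]: in range under Pre_ (eq nonempty)
  let st := (PySem.List.slice s (some 1) none).foldl pvStep
      (prev0, (if prev0 == '=' then (1 : Int) else 0), pvIsOp prev0)
  !st.2.2 && !(pvIsOp st.1) && (st.2.1 == 1)

-- ===== PRECONDITION & SPEC =====
-- Pre_ excludes only the empty string, on which A raises IndexError at eq[0] (B raises there too).
def Pre_valid_equation (eq : String) : Prop := eq.toList ≠ []
instance (eq : String) : Decidable (Pre_valid_equation eq) := by unfold Pre_valid_equation; infer_instance
def pvWitness_valid_equation : String := "1+2=3"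

def Spec_valid_equation (eq : String) (out : Bool) : Prop := out = valid_equation_alt eq
instance (eq : String) (out : Bool) : Decidable (Spec_valid_equation eq out) := by unfold Spec_valid_equation; infer_instance

-- ===== CLAIM (what is proved, stated in full; the proofs are below) =====
def Claim_equal_valid_equation : Prop := ∀ (eq : String), Dom_valid_equation eq → Pre_valid_equation eq → Spec_valid_equation eq (valid_equation eq)

-- ===== LEMMAS AND PROOFS =====

theorem pvIsOp_eq_isop (c : Char) : pvIsOp c = is_operation c := rfl

-- A's two scans as 'any' over the index list
theorem pvScanOps_eq_any (s : List Char) (idxs : List Int) :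
    pvScanOps s idxs = !(idxs.any (fun i =>
      is_operation (PySem.List.pyGetD s i ' ') && decide (i + 1 < (s.length : Int)) &&
      is_operation (PySem.List.pyGetD s (i+1) ' '))) := by
  induction idxs with
  | nil => rfl
  | cons i rest ih =>
      simp only [pvScanOps, List.any_cons]
      by_cases h1 : is_operation (PySem.List.pyGetD s i ' ')
      · by_cases h2 : decide (i + 1 < (s.length : Int)) && is_operation (PySem.List.pyGetD s (i+1) ' ')
        · simp [h1, h2]
        · simp only [Bool.and_eq_true] at h2
          simp [h1, ih]
      · simp [h1, ih]

theorem pvScanDiv_eq_any (s : List Char) (idxs : List Int) :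
    pvScanDiv s idxs = !(idxs.any (fun i =>
      PySem.List.pyGetD s i ' ' == '/' && PySem.List.pyGetD s (i+1) ' ' == '0')) := by
  induction idxs with
  | nil => rfl
  | cons i rest ih =>
      simp only [pvScanDiv, List.any_cons]
      by_cases h : PySem.List.pyGetD s i ' ' == '/' && PySem.List.pyGetD s (i+1) ' ' == '0'
      · simp [h]
      · simp [h, ih]

-- adjacency characterisation: an 'any' over consecutive pairs, for any pair test f
theorem adj_exists_iff (s : List Char) (f : Char → Char → Bool) :
    ((s.zip s.tail).any (fun q => f q.1 q.2) = true) ↔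
      (∃ i : Nat, i + 1 < s.length ∧ f s[i]! s[i+1]! = true) := by
  rw [List.any_eq_true]
  constructor
  · rintro ⟨q, hq, hp⟩
    obtain ⟨i, hi, hget⟩ := List.mem_iff_getElem.mp hq
    have hlt : i + 1 < s.length := by
      have := hi; rw [List.length_zip] at this
      have ht : s.tail.length = s.length - 1 := List.length_tail
      omega
    have h1 : q.1 = s[i] := by rw [← hget]; simp [List.getElem_zip]
    have h2 : q.2 = s[i+1] := by
      rw [← hget]; simp [List.getElem_zip, List.getElem_tail]
    refine ⟨i, hlt, ?_⟩
    rw [getElem!_pos s i (by omega), getElem!_pos s (i+1) hlt, ← h1, ← h2]; exact hp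
  · rintro ⟨i, hlt, hf⟩
    refine ⟨(s[i], s[i+1]), ?_, ?_⟩
    · rw [List.mem_iff_getElem]
      refine ⟨i, ?_, ?_⟩
      · rw [List.length_zip]; simp [List.length_tail]; omega
      · simp [List.getElem_zip, List.getElem_tail]
    · rw [getElem!_pos s i (by omega), getElem!_pos s (i+1) hlt] at hf; exact hf

-- "/0" is a substring iff some adjacent pair is '/','0'
theorem slash0_iff (s : List Char) :
    (PySem.Chars.isIn ['/', '0'] s = true) ↔
      (∃ i : Nat, i + 1 < s.length ∧ s[i]! = '/' ∧ s[i+1]! = '0') := by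
  rw [← PySem.Chars.exists_prefix_drop_iff_isIn]
  constructor
  · rintro ⟨j, hpre⟩
    obtain ⟨t, ht⟩ := hpre
    have hj : j < s.length := by
      by_contra h
      rw [List.drop_eq_nil_of_le (by omega)] at ht
      exact absurd ht (by simp)
    have hlt : j + 1 < s.length := by
      have : (s.drop j).length = (['/', '0'] ++ t).length := by rw [ht]
      simp at this; omega
    have hd : List.drop j s = '/' :: '0' :: t := by simpa using ht.symm
    refine ⟨j, hlt, ?_, ?_⟩
    · have h0 : (s.drop j)[0]'(by rw [hd]; simp) = '/' := by simp [hd]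
      rw [List.getElem_drop] at h0
      rw [getElem!_pos s j (by omega)]; simpa using h0
    · have h1 : (s.drop j)[1]'(by rw [hd]; simp) = '0' := by simp [hd]
      rw [List.getElem_drop] at h1
      rw [getElem!_pos s (j+1) hlt]; simpa using h1
  · rintro ⟨i, hlt, h1, h2⟩
    refine ⟨i, s.drop (i+2), ?_⟩
    rw [getElem!_pos s i (by omega)] at h1
    rw [getElem!_pos s (i+1) hlt] at h2
    have : s.drop i = s[i] :: s[i+1] :: s.drop (i+2) := by
      rw [List.drop_eq_getElem_cons (by omega)]
      congr 1
      rw [List.drop_eq_getElem_cons hlt]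
    rw [this, h1, h2]
    simp

theorem lemOps (s : List Char) :
    ((PySem.List.pyRange 0 (s.length : Int) 1).any (fun i =>
      is_operation (PySem.List.pyGetD s i ' ') && decide (i + 1 < (s.length : Int)) &&
      is_operation (PySem.List.pyGetD s (i+1) ' ')) = true) ↔
    ((s.zip s.tail).any (fun q => is_operation q.1 && is_operation q.2) = true) := by
  rw [adj_exists_iff s (fun a b => is_operation a && is_operation b), List.any_eq_true]
  constructor
  · rintro ⟨i, hmem, hf⟩
    rw [PySem.List.mem_pyRange_one] at hmem
    obtain ⟨h0, hlen⟩ := hmem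
    simp only [Bool.and_eq_true, decide_eq_true_eq] at hf
    obtain ⟨⟨h1, hlt⟩, h2⟩ := hf
    refine ⟨i.toNat, by omega, ?_⟩
    simp only [Bool.and_eq_true]
    constructor
    · rw [PySem.List.pyGetD_eq_getElem s ' ' h0 (by omega)] at h1
      rwa [getElem!_pos s i.toNat (by omega)]
    · rw [PySem.List.pyGetD_eq_getElem s ' ' (by omega) (by omega)] at h2
      rw [getElem!_pos s (i.toNat+1) (by omega)]
      have he : (i+1).toNat = i.toNat + 1 := by omega
      simpa [he] using h2
  · rintro ⟨k, hk, hf⟩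
    simp only [Bool.and_eq_true] at hf
    obtain ⟨h1, h2⟩ := hf
    refine ⟨(k : Int), ?_, ?_⟩
    · rw [PySem.List.mem_pyRange_one]
      constructor
      · positivity
      · exact_mod_cast (by omega : k < s.length)
    · simp only [Bool.and_eq_true, decide_eq_true_eq]
      rw [getElem!_pos s k (by omega)] at h1
      rw [getElem!_pos s (k+1) (by omega)] at h2
      refine ⟨⟨?_, by exact_mod_cast (by omega : k + 1 < s.length)⟩, ?_⟩
      · rw [PySem.List.pyGetD_eq_getElem s ' ' (by positivity) (by exact_mod_cast (by omega : k < s.length))]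
        simpa using h1
      · rw [PySem.List.pyGetD_eq_getElem s ' ' (by positivity) (by exact_mod_cast (by omega : k + 1 < s.length))]
        have he : ((k : Int) + 1).toNat = k + 1 := by omega
        simpa [he] using h2

theorem lemDiv (s : List Char) :
    ((PySem.List.pyRange 0 ((s.length : Int) - 1) 1).any (fun i =>
      PySem.List.pyGetD s i ' ' == '/' && PySem.List.pyGetD s (i+1) ' ' == '0') = true) ↔
    (PySem.Chars.isIn ['/', '0'] s = true) := by
  rw [slash0_iff, List.any_eq_true]
  constructor
  · rintro ⟨i, hmem, hf⟩
    rw [PySem.List.mem_pyRange_one] at hmem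
    obtain ⟨h0, hlen⟩ := hmem
    simp only [Bool.and_eq_true, beq_iff_eq] at hf
    obtain ⟨h1, h2⟩ := hf
    have hlt : i.toNat + 1 < s.length := by omega
    refine ⟨i.toNat, hlt, ?_, ?_⟩
    · rw [PySem.List.pyGetD_eq_getElem s ' ' h0 (by omega)] at h1
      rwa [getElem!_pos s i.toNat (by omega)]
    · rw [PySem.List.pyGetD_eq_getElem s ' ' (by omega) (by omega)] at h2
      rw [getElem!_pos s (i.toNat+1) hlt]
      have he : (i+1).toNat = i.toNat + 1 := by omega
      simpa [he] using h2
  · rintro ⟨k, hk, h1, h2⟩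
    refine ⟨(k : Int), ?_, ?_⟩
    · rw [PySem.List.mem_pyRange_one]
      constructor
      · positivity
      · omega
    · simp only [Bool.and_eq_true, beq_iff_eq]
      rw [getElem!_pos s k (by omega)] at h1
      rw [getElem!_pos s (k+1) (by omega)] at h2
      constructor
      · rw [PySem.List.pyGetD_eq_getElem s ' ' (by positivity) (by exact_mod_cast (by omega : k < s.length))]
        simpa using h1
      · rw [PySem.List.pyGetD_eq_getElem s ' ' (by positivity) (by exact_mod_cast (by omega : k + 1 < s.length))]
        have he : ((k : Int) + 1).toNat = k + 1 := by omega
        simpa [he] using h2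

theorem lemNoSlash (s : List Char) (h : PySem.Chars.isIn ['/'] s = false) :
    PySem.Chars.isIn ['/', '0'] s = false := by
  rw [PySem.Chars.isIn_eq_false_iff] at h ⊢
  intro hinf
  exact h (List.IsInfix.trans (List.IsPrefix.isInfix ⟨['0'], rfl⟩) hinf)

-- chain of B's two pair tests along a list, starting from 'prev'
def pvChainBad (p : Char) : List Char → Bool
  | [] => false
  | c :: t => (pvIsOp p && pvIsOp c) || (p == '/' && c == '0') || pvChainBad c t

-- invariant of B's single pass
theorem pvFold_inv (l : List Char) (p : Char) (e : Int) (b : Bool) :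
    l.foldl pvStep (p, e, b) =
      (l.getLastD p, e + (l.count '=' : Int), b || pvChainBad p l) := by
  induction l generalizing p e b with
  | nil => simp [pvChainBad]
  | cons c t ih =>
      simp only [List.foldl_cons, pvStep, ih, List.getLastD_cons, pvChainBad,
        Prod.mk.injEq]
      refine ⟨trivial, ?_, ?_⟩
      · rw [List.count_cons]
        by_cases hc : c = '='
        · simp [hc]; ring
        · simp [hc]
      · simp [Bool.or_assoc]

-- chainBad from the head is the zip-pair 'any'
theorem pvChainBad_eq_zip (p : Char) (l : List Char) :
    pvChainBad p l =
      ((p :: l).zip l).any (fun q => (pvIsOp q.1 && pvIsOp q.2) || (q.1 == '/' && q.2 == '0')) := by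
  induction l generalizing p with
  | nil => rfl
  | cons c t ih => simp [pvChainBad, List.zip, ih]

-- 'any' of a disjunction splits
theorem any_or_split (l : List (Char × Char)) (f g : Char × Char → Bool) :
    l.any (fun q => f q || g q) = (l.any f || l.any g) := by
  induction l with
  | nil => rfl
  | cons x t ih =>
      simp only [List.any_cons, ih]
      cases f x <;> cases g x <;> simp

-- single-character substring count is List.count
theorem countgo_single (c : Char) (l : List Char) (fuel acc : Nat) (h : l.length ≤ fuel) :
    PySem.Chars.count.go [c] fuel l acc = acc + l.count c := by
  induction l generalizing fuel acc with
  | nil => cases fuel <;> simp [PySem.Chars.count.go]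
  | cons x t ih =>
      cases fuel with
      | zero => simp at h
      | succ n =>
          have hlen : t.length ≤ n := by simp at h; omega
          have hp : [c].isPrefixOf (x :: t) = (c == x) := by simp [List.isPrefixOf]
          rw [PySem.Chars.count.go]
          simp only [hp]
          by_cases hx : (c == x) = true
          · rw [if_pos hx]
            have hdrop : List.drop ([c].length) (x :: t) = t := by simp
            have hxc : x = c := (beq_iff_eq.mp hx).symm
            rw [hdrop, ih n (acc + 1) hlen, List.count_cons]
            simp [hxc]
            omega
          · rw [if_neg (by simpa using hx)]
            have hxc : ¬ x = c := fun hh => hx (by simp [hh])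
            rw [ih n acc hlen, List.count_cons]
            simp [hxc]

theorem count_single (s : List Char) (c : Char) :
    PySem.Chars.count s [c] = s.count c := by
  unfold PySem.Chars.count
  simp [countgo_single c s s.length 0 le_rfl]

-- ===== VERDICT (by name: the statement is the Claim_ definition above) =====
theorem valid_equation_spec : Claim_equal_valid_equation := by
  intro eq _ hpre
  unfold Spec_valid_equation valid_equation valid_equation_alt
  obtain ⟨p, t, hst⟩ : ∃ p t, eq.toList = p :: t := by
    cases h : eq.toList with
    | nil => exact absurd h hpre
    | cons a b => exact ⟨a, b, rfl⟩
  have hcount : PySem.Str.count eq "=" = (p :: t).count '=' := by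
    rw [PySem.Str.count_eq, show ("=" : String).toList = ['='] from rfl, hst, count_single]
  have hslash : PySem.Str.isIn "/" eq = PySem.Chars.isIn ['/'] (p :: t) := by
    rw [PySem.Str.isIn_eq, show ("/" : String).toList = ['/'] from rfl, hst]
  have hlast : PySem.List.pyGetD (p :: t) (-1) ' ' = t.getLastD p := by
    rw [PySem.List.pyGetD_neg_one (p :: t) ' ' (by simp), List.getLast_eq_getLastD]
  simp only [hst, PySem.List.slice_from_one, List.tail_cons, PySem.List.pyGetD_zero_cons,
    pvFold_inv, hcount, hslash, hlast, pvScanOps_eq_any, pvScanDiv_eq_any, pvIsOp_eq_isop,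
    Bool.not_eq_false', lemOps, lemDiv, List.tail_cons]
  have hchain : pvChainBad p t =
      ((((p :: t).zip t).any fun q => is_operation q.1 && is_operation q.2) ||
        PySem.Chars.isIn ['/', '0'] (p :: t)) := by
    rw [pvChainBad_eq_zip, any_or_split]
    congr 1
    have h1 := adj_exists_iff (p :: t) (fun a b => a == '/' && b == '0')
    have h2 := slash0_iff (p :: t)
    simp only [List.tail_cons] at h1
    by_cases hh : (((p :: t).zip t).any fun q => q.1 == '/' && q.2 == '0') = true
    · rw [hh]
      obtain ⟨i, hi, hf⟩ := h1.mp hh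
      simp only [Bool.and_eq_true, beq_iff_eq] at hf
      exact (h2.mpr ⟨i, hi, hf.1, hf.2⟩).symm
    · rw [Bool.not_eq_true] at hh
      rw [hh]
      symm
      rw [← Bool.not_eq_true]
      intro hq
      obtain ⟨i, hi, ha, hb⟩ := h2.mp hq
      have : (((p :: t).zip t).any fun q => q.1 == '/' && q.2 == '0') = true :=
        h1.mpr ⟨i, hi, by simp [ha, hb]⟩
      rw [hh] at this
      exact Bool.false_ne_true this
  rw [hchain]
  have hcnt2 : ((if (p == '=') = true then (1:Int) else 0) + (List.count '=' t : Int)) =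
      (List.count '=' (p :: t) : Int) := by
    by_cases hp' : p = '=' <;> simp [List.count_cons, hp'] <;> omega
  rw [hcnt2]
  have hbeq : ((List.count '=' (p :: t) : Int) == 1) = (List.count '=' (p :: t) == 1) := by
    simp
  rw [hbeq]
  have hguard : (if PySem.Chars.isIn ['/'] (p :: t) = true then
      (if PySem.Chars.isIn ['/', '0'] (p :: t) = true then false else true) else true) =
      !PySem.Chars.isIn ['/', '0'] (p :: t) := by
    by_cases hs : PySem.Chars.isIn ['/'] (p :: t) = true
    · by_cases h0 : PySem.Chars.isIn ['/', '0'] (p :: t) = true <;> simp [hs, h0]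
    · have h0 := lemNoSlash (p :: t) (by simpa using hs)
      simp [hs, h0]
  rw [hguard]
  by_cases hb1 : is_operation p = true <;>
  by_cases hb2 : is_operation (t.getLastD p) = true <;>
  by_cases hc : List.count '=' (p :: t) = 1 <;>
  by_cases hz : (((p :: t).zip t).any fun q => is_operation q.1 && is_operation q.2) = true <;>
  by_cases h0 : PySem.Chars.isIn ['/', '0'] (p :: t) = true <;>
  simp [hb1, hb2, hc, hz, h0]
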